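-- pv_equiv track=rewrite | github.com/akash-shaw/information-security-lab | aad/Lab1/q2_autokey.py | autokey_de
-- ===== SOURCE A (Python) =====
-- def autokey_de(ctext, ak):
--     k = ord(ak.upper()) if isinstance(ak, str) else ak
--     out = []
--     for ch in ctext.upper():
--         if ch.isalpha():
--             p = chr((ord(ch) - 65 - (k - 65)) % 26 + 65)
--             out.append(p); k = ord(p)
--         else:
--             out.append(ch)
--     return ''.join(out)
-- ===== SOURCE B (Python) =====
-- def autokey_de(ctext, ak):
--     k = ord(ak.upper()) if isinstance(ak, str) else ak
--     up = ctext.upper()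
--     # pass 1: decrypt only the letter stream, each plaintext letter feeding the key
--     dec = []
--     for c in filter(str.isalpha, up):
--         p = chr((ord(c) - k) % 26 + 65)
--         dec.append(p)
--         k = ord(p)
--     # pass 2: merge decrypted letters back into the non-letter skeleton
--     it = iter(dec)
--     return ''.join(next(it) if c.isalpha() else c for c in up)
-- ===== Notes on version B (the rewrite author's own statement) =====
-- stated objective: alternative
-- what changed: B splits A's single accumulator loop into a decryption pass over just the filtered letter stream followed by a merge pass that reinserts decrypted letters into the non-letter skeleton.
import Mathlib
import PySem

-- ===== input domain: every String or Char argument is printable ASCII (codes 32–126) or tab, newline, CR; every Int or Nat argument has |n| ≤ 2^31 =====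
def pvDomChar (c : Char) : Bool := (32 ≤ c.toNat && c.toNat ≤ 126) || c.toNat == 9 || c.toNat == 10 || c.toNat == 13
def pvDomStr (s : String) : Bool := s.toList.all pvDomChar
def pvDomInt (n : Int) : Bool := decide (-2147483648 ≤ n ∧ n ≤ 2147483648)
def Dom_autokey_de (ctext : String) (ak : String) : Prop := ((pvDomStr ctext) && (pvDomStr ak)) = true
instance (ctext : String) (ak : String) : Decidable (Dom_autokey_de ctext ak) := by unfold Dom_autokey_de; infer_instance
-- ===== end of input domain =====

-- B splits A's single loop into a decrypt pass over the filtered letter stream plus a merge pass (alternative decomposition, same cost).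


-- ===== PORT A =====
-- ord(ak.upper()) needs len(ak) == 1 (else TypeError, outside Pre_); headD 'A' is only a total stand-in there.
def autokeyInitKey (ak : String) : Int := (((PySem.Str.upper ak).toList.headD 'A').toNat : Int)

def autokeyStepA (s : List Char × Int) (ch : Char) : List Char × Int :=
  if PySem.Chars.isalpha ch then
    let p := Char.ofNat (PySem.Int.mod ((ch.toNat : Int) - 65 - (s.2 - 65)) 26 + 65).toNat
    (s.1 ++ [p], (p.toNat : Int))
  else (s.1 ++ [ch], s.2)

def autokey_de (ctext : String) (ak : String) : String :=
  let k := autokeyInitKey ak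
  String.ofList ((PySem.Str.upper ctext).toList.foldl autokeyStepA ([], k)).1

-- ===== PORT B =====
def autokeyDecLetters (k : Int) : List Char → List Char
  | [] => []
  | c :: rest =>
    let p := Char.ofNat (PySem.Int.mod ((c.toNat : Int) - k) 26 + 65).toNat
    p :: autokeyDecLetters ((p.toNat : Int)) rest

def autokeyMerge : List Char → List Char → List Char
  | [], _ => []
  | c :: rest, ds =>
    if PySem.Chars.isalpha c then
      match ds with
      | [] => []            -- unreachable: dec has one letter per alpha position
      | d :: ds' => d :: autokeyMerge rest ds'
    else c :: autokeyMerge rest ds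

def autokey_de_alt (ctext : String) (ak : String) : String :=
  let k := autokeyInitKey ak
  let up := (PySem.Str.upper ctext).toList
  let dec := autokeyDecLetters k (up.filter PySem.Chars.isalpha)
  String.ofList (autokeyMerge up dec)

-- ===== PRECONDITION & SPEC =====
-- Pre_ excludes ak of length ≠ 1, where ord(ak.upper()) raises TypeError in A.
def Pre_autokey_de (ctext : String) (ak : String) : Prop := ak.toList.length = 1
instance (ctext : String) (ak : String) : Decidable (Pre_autokey_de ctext ak) := by unfold Pre_autokey_de; infer_instance
def pvWitness_autokey_de : String × String := ("AB c!", "Q")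

def Spec_autokey_de (ctext : String) (ak : String) (out : String) : Prop := out = autokey_de_alt ctext ak
instance (ctext : String) (ak : String) (out : String) : Decidable (Spec_autokey_de ctext ak out) := by unfold Spec_autokey_de; infer_instance

-- ===== CLAIM (what is proved, stated in full; the proofs are below) =====
def Claim_equal_autokey_de : Prop := ∀ (ctext : String) (ak : String), Dom_autokey_de ctext ak → Pre_autokey_de ctext ak → Spec_autokey_de ctext ak (autokey_de ctext ak)

-- ===== LEMMAS AND PROOFS =====
theorem autokey_fold_eq_merge (l : List Char) : ∀ (acc : List Char) (k : Int),
    (l.foldl autokeyStepA (acc, k)).1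
      = acc ++ autokeyMerge l (autokeyDecLetters k (l.filter PySem.Chars.isalpha)) := by
  induction l with
  | nil => intro acc k; simp [autokeyMerge]
  | cons c rest ih =>
    intro acc k
    by_cases h : PySem.Chars.isalpha c = true
    · have harg : (c.toNat : Int) - 65 - (k - 65) = (c.toNat : Int) - k := by ring
      simp only [List.foldl_cons, autokeyStepA, h, if_pos, List.filter_cons_of_pos h,
        autokeyDecLetters, autokeyMerge, harg, ih]
      simp
    · simp only [List.foldl_cons, autokeyStepA, h, if_neg, Bool.false_eq_true,
        not_false_iff, List.filter_cons_of_neg, autokeyMerge, ih]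
      simp

-- ===== VERDICT (by name: the statement is the Claim_ definition above) =====
theorem autokey_de_spec : Claim_equal_autokey_de := by
  intro ctext ak _ _
  unfold Spec_autokey_de autokey_de autokey_de_alt
  simp only [autokey_fold_eq_merge, List.nil_append]
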